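-- pv_equiv track=rewrite | github.com/soieu/FinanceAlgo | 6주차/정지영/프로그래머스입문[1회차]-[2일차].py | solution
-- ===== SOURCE A (Python) =====
-- def solution(array):
--
--     m = {}
--     for a in array:
--         if a not in m:
--             m[a] = 1
--         else:
--             m[a] += 1
--
--
--     # 최빈값 반환
--     c = 0
--     for i,j in m.items():
--         if j == max(m.values()):
--             c += 1
--
--     if c == 1:
--         return [k for k,v in m.items() if v == max(m.values())][0]
--     else:
--         return -1
-- ===== SOURCE B (Python) =====
-- def solution(array):
--     # Single left-to-right pass over first occurrences, tracking a running
--     # best count and a uniqueness flag; no dict and no repeated max() passes.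
--     seen = []
--     best, best_cnt, unique = -1, 0, False
--     for a in array:
--         if a in seen:
--             continue
--         seen.append(a)
--         c = array.count(a)
--         if c > best_cnt:
--             best, best_cnt, unique = a, c, True
--         elif c == best_cnt:
--             unique = False
--     return best if unique else -1
-- ===== Notes on version B (the rewrite author's own statement) =====
-- stated objective: alternative
-- what changed: Replaces the dict-counting plus repeated max(m.values()) scans and a final filter comprehension by one online pass over first occurrences that maintains a running best count and a uniqueness flag.
import Mathlib
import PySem

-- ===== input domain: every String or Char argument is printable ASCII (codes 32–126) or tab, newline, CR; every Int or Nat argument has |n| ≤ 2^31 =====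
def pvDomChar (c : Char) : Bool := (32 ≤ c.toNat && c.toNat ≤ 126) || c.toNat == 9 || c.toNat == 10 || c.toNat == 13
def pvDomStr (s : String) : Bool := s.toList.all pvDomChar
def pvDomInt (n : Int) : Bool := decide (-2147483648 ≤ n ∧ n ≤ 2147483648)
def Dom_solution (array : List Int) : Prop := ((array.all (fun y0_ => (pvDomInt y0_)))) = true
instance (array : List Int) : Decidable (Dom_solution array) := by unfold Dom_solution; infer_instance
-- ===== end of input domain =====

-- B replaces dict counting + repeated max() scans by one online pass with a running best count and uniqueness flag (alternative decomposition; return value only).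


-- ===== PORT A =====
def solution (array : List Int) : Int :=
  let m : PySem.Dict Int Int := array.foldl (fun m a =>
    if m.contains a = false then m.insert a 1
    else m.insert a ((m.get? a).getD 0 + 1)) PySem.Dict.empty
  let c : Int := m.items.foldl (fun c ij =>
    if some ij.2 == PySem.List.max? m.values (fun v => v) then c + 1 else c) 0
  if c = 1 then
    -- Python: [k for k,v in m.items() if v == max(m.values())][0]
    match PySem.List.pyGet? ((m.items.filter
        (fun kv => some kv.2 == PySem.List.max? m.values (fun v => v))).map Prod.fst) 0 with
    | some k => k
    | none => -1  -- unreachable: c = 1 makes the filtered list nonempty (Python's [0] only raises on [])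
  else -1

-- ===== PORT B =====
def solution_alt (array : List Int) : Int :=
  let st : List Int × Int × Int × Bool := array.foldl (fun st a =>
    if a ∈ st.1 then st
    else
      let c : Int := (PySem.List.count array a : Int)
      if c > st.2.2.1 then (st.1 ++ [a], a, c, true)
      else if c = st.2.2.1 then (st.1 ++ [a], st.2.1, st.2.2.1, false)
      else (st.1 ++ [a], st.2.1, st.2.2.1, st.2.2.2)) ([], -1, 0, false)
  if st.2.2.2 then st.2.1 else -1

-- ===== PRECONDITION & SPEC =====
def Spec_solution (array : List Int) (out : Int) : Prop := out = solution_alt array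
instance (array : List Int) (out : Int) : Decidable (Spec_solution array out) := by unfold Spec_solution; infer_instance

-- ===== CLAIM (what is proved, stated in full; the proofs are below) =====
def Claim_equal_solution : Prop := ∀ (array : List Int), Dom_solution array → Spec_solution array (solution array)

-- ===== LEMMAS AND PROOFS =====

-- occurrence count as an Int
def pvCnt (array : List Int) (k : Int) : Int := (PySem.List.count array k : Int)

-- B's single step on the (best, best_cnt, unique) part of the state
def pvStep (array : List Int) (t : Int × Int × Bool) (k : Int) : Int × Int × Bool :=
  let c := pvCnt array k
  if c > t.2.1 then (k, c, true)
  else if c = t.2.1 then (t.1, t.2.1, false)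
  else t

def pvScan (array : List Int) (t : Int × Int × Bool) (ks : List Int) : Int × Int × Bool :=
  ks.foldl (pvStep array) t

-- the fresh elements xs contributes after seen, in order
def pvNews (seen : List Int) : List Int → List Int
  | [] => []
  | a :: xs => if a ∈ seen then pvNews seen xs else a :: pvNews (seen ++ [a]) xs

-- invariant of B's scan after having processed the distinct keys P
def pvInv (array : List Int) (P : List Int) (t : Int × Int × Bool) : Prop :=
  (∀ x ∈ P, pvCnt array x ≤ t.2.1) ∧
  (P = [] → t.2.1 = 0) ∧
  (P ≠ [] → ∃ x ∈ P, pvCnt array x = t.2.1) ∧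
  (t.2.2 = true ↔ (P.countP (fun k => pvCnt array k = t.2.1) = 1 ∧ P ≠ [])) ∧
  (t.2.2 = true → t.1 ∈ P ∧ pvCnt array t.1 = t.2.1)

theorem pvUpdate_eq_append_news (xs seen : List Int) :
    PySem.Set.update seen xs = seen ++ pvNews seen xs := by
  induction xs generalizing seen with
  | nil => simp [pvNews, PySem.Set.update_nil]
  | cons a xs ih =>
    by_cases h : a ∈ seen
    · simp [pvNews, h, PySem.Set.update_cons, ih]
    · simp [pvNews, h, PySem.Set.update_cons, ih]

theorem pvNews_nil (xs : List Int) : pvNews [] xs = PySem.Set.ofList xs := by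
  have := pvUpdate_eq_append_news xs []
  simpa [PySem.Set.update_nil_left] using this.symm

theorem pvBFold (array : List Int) (xs : List Int) (seen : List Int) (t : Int × Int × Bool) :
    xs.foldl (fun st a =>
      if a ∈ st.1 then st
      else
        let c : Int := (PySem.List.count array a : Int)
        if c > st.2.2.1 then (st.1 ++ [a], a, c, true)
        else if c = st.2.2.1 then (st.1 ++ [a], st.2.1, st.2.2.1, false)
        else (st.1 ++ [a], st.2.1, st.2.2.1, st.2.2.2)) (seen, t)
    = (PySem.Set.update seen xs, pvScan array t (pvNews seen xs)) := by
  induction xs generalizing seen t with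
  | nil => simp [pvScan, pvNews, PySem.Set.update_nil]
  | cons a xs ih =>
    by_cases h : a ∈ seen
    · simpa [pvNews, h, PySem.Set.update_cons, PySem.Set.add_of_mem h] using ih seen t
    · have hstep := ih (seen ++ [a]) (pvStep array t a)
      simp only [List.foldl_cons, h, if_false, PySem.Set.update_cons,
        PySem.Set.add_of_not_mem h, pvNews, pvScan, pvStep, pvCnt] at *
      by_cases h1 : t.2.1 < ((List.count a array : Int))
      · simpa [h, h1] using hstep
      · by_cases h2 : ((List.count a array : Int)) = t.2.1
        · simpa [h, h1, h2] using hstep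
        · simpa [h, h1, h2] using hstep

theorem pvStep_eq_of_gt (array : List Int) (t : Int × Int × Bool) (a : Int)
    (h : t.2.1 < pvCnt array a) : pvStep array t a = (a, pvCnt array a, true) := by
  unfold pvStep
  rw [if_pos h]

theorem pvStep_eq_of_eq (array : List Int) (t : Int × Int × Bool) (a : Int)
    (h : pvCnt array a = t.2.1) : pvStep array t a = (t.1, t.2.1, false) := by
  unfold pvStep
  rw [if_neg (by omega), if_pos h]

theorem pvStep_eq_of_lt (array : List Int) (t : Int × Int × Bool) (a : Int)
    (h : pvCnt array a < t.2.1) : pvStep array t a = t := by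
  unfold pvStep
  rw [if_neg (by omega), if_neg (by omega)]

theorem pvInv_step (array : List Int) (P : List Int) (t : Int × Int × Bool) (a : Int)
    (hI : pvInv array P t) (ha : 1 ≤ pvCnt array a) :
    pvInv array (P ++ [a]) (pvStep array t a) := by
  obtain ⟨hub, hemp, hatt, hiff, hbest⟩ := hI
  rcases lt_trichotomy t.2.1 (pvCnt array a) with h1 | h1 | h1
  · rw [pvStep_eq_of_gt array t a h1]
    refine ⟨?_, by simp, ?_, ?_, ?_⟩
    · intro x hx
      rcases List.mem_append.mp hx with hx | hx
      · exact le_of_lt (lt_of_le_of_lt (hub x hx) h1)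
      · simp only [List.mem_singleton] at hx; subst hx; exact le_refl _
    · intro _; exact ⟨a, by simp, rfl⟩
    · constructor
      · intro _
        refine ⟨?_, by simp⟩
        rw [List.countP_append]
        have hP0 : P.countP (fun k => pvCnt array k = pvCnt array a) = 0 := by
          rw [List.countP_eq_zero]
          intro x hx hx'
          have := hub x hx
          simp only [decide_eq_true_eq] at hx'
          omega
        simp [hP0]
      · intro _; rfl
    · intro _; exact ⟨by simp, rfl⟩
  · rw [pvStep_eq_of_eq array t a h1.symm]
    have hPne : P ≠ [] := by
      intro hP
      have := hemp hP
      omega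
    obtain ⟨x0, hx0, hx0c⟩ := hatt hPne
    have hPpos : 1 ≤ P.countP (fun k => pvCnt array k = t.2.1) := by
      have hmem : x0 ∈ P.filter (fun k => decide (pvCnt array k = t.2.1)) := by
        simp [List.mem_filter, hx0, hx0c]
      have hne : P.filter (fun k => decide (pvCnt array k = t.2.1)) ≠ [] :=
        List.ne_nil_of_mem hmem
      have hlen := List.length_pos_iff.mpr hne
      rw [List.countP_eq_length_filter]
      omega
    refine ⟨?_, by simp, ?_, ?_, by simp⟩
    · intro x hx
      rcases List.mem_append.mp hx with hx | hx
      · exact hub x hx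
      · simp only [List.mem_singleton] at hx; subst hx; exact le_of_eq h1.symm
    · intro _; exact ⟨x0, by simp [hx0], hx0c⟩
    · simp only [List.countP_append, Bool.false_eq_true, false_iff]
      intro hcc
      have h1' : List.countP (fun k => decide (pvCnt array k = t.2.1)) [a] = 1 := by
        simp [h1]
      omega
  · rw [pvStep_eq_of_lt array t a h1]
    have hPne : P ≠ [] := by
      intro hP
      have := hemp hP
      omega
    obtain ⟨x0, hx0, hx0c⟩ := hatt hPne
    refine ⟨?_, by simp, ?_, ?_, ?_⟩
    · intro x hx
      rcases List.mem_append.mp hx with hx | hx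
      · exact hub x hx
      · simp only [List.mem_singleton] at hx; subst hx; exact le_of_lt h1
    · intro _; exact ⟨x0, by simp [hx0], hx0c⟩
    · rw [hiff]
      simp only [List.countP_append]
      have hz : List.countP (fun k => decide (pvCnt array k = t.2.1)) [a] = 0 := by
        simp only [List.countP_cons, List.countP_nil]
        have : ¬ (pvCnt array a = t.2.1) := by omega
        simp [this]
      simp [hz, hPne]
    · intro hu
      obtain ⟨hb, hbc⟩ := hbest hu
      exact ⟨by simp [hb], hbc⟩

theorem pvInv_scan (array : List Int) (ks : List Int) (P : List Int) (t : Int × Int × Bool)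
    (hI : pvInv array P t) (hk : ∀ k ∈ ks, 1 ≤ pvCnt array k) :
    pvInv array (P ++ ks) (pvScan array t ks) := by
  induction ks generalizing P t with
  | nil => simpa [pvScan]
  | cons a ks ih =>
    have h1 := pvInv_step array P t a hI (hk a (by simp))
    have h2 := ih (P ++ [a]) (pvStep array t a) h1 (fun k hmem => hk k (by simp [hmem]))
    simpa [pvScan, List.append_assoc] using h2

theorem pvInv_init (array : List Int) : pvInv array [] ((-1 : Int), (0 : Int), false) := by
  refine ⟨by simp, fun _ => rfl, by simp, ?_, by simp⟩
  simp

-- A's dict is Counter(array)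
theorem pvDict_eq_counter (array : List Int) :
    array.foldl (fun m a =>
      if m.contains a = false then m.insert a 1
      else m.insert a ((m.get? a).getD 0 + 1)) PySem.Dict.empty
    = PySem.Dict.counter array := by
  have hfun : (fun (m : PySem.Dict Int Int) a =>
      if m.contains a = false then m.insert a 1
      else m.insert a ((m.get? a).getD 0 + 1))
      = (fun (m : PySem.Dict Int Int) a => m.insert a (m.getD a 0 + 1)) := by
    funext m a
    by_cases h : m.contains a = false
    · rw [if_pos h]
      have hg : m.get? a = none := by
        rw [PySem.Dict.get?_eq_none_iff_contains]; exact h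
      rw [PySem.Dict.getD_eq_get?_getD, hg]
      norm_num
    · rw [if_neg h, PySem.Dict.getD_eq_get?_getD]
  rw [hfun]
  exact PySem.Dict.foldl_insert_getD_add_one_eq_counter array

theorem solution_alt_eq_scan (array : List Int) :
    solution_alt array =
      (if (pvScan array ((-1 : Int), (0 : Int), false) (PySem.Set.ofList array)).2.2 then
        (pvScan array ((-1 : Int), (0 : Int), false) (PySem.Set.ofList array)).1 else -1) := by
  unfold solution_alt
  rw [show (([], -1, 0, false) : List Int × Int × Int × Bool) = ((([] : List Int)), ((-1 : Int), (0:Int), false)) from rfl]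
  rw [pvBFold array array [] ((-1 : Int), (0 : Int), false), pvNews_nil]

theorem pvFilter_len_one (b : Int) (F : List Int) (hb : b ∈ F) (hlen : F.length = 1) :
    F = [b] := by
  obtain ⟨x, hx⟩ := List.length_eq_one_iff.mp hlen
  subst hx
  have hbx := List.mem_singleton.mp hb
  rw [hbx]

theorem solution_eq_of_ne_nil (array : List Int) (hne : array ≠ []) :
    solution array =
      (if (pvScan array ((-1 : Int), (0 : Int), false) (PySem.Set.ofList array)).2.2 then
        (pvScan array ((-1 : Int), (0 : Int), false) (PySem.Set.ofList array)).1 else -1) := by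
  obtain ⟨a0, ha0⟩ := List.exists_mem_of_ne_nil array hne
  have hcnt : ∀ k ∈ PySem.Set.ofList array, 1 ≤ pvCnt array k := by
    intro k hk
    have hk' : k ∈ array := (PySem.Set.mem_ofList array k).mp hk
    have hp := List.count_pos_iff.mpr hk'
    unfold pvCnt
    simp only [PySem.List.count_eq]
    omega
  have hInv0 := pvInv_scan array (PySem.Set.ofList array) [] _ (pvInv_init array) hcnt
  rw [List.nil_append] at hInv0
  set D := PySem.Set.ofList array with hDdef
  set t := pvScan array ((-1 : Int), (0 : Int), false) D with htdef
  obtain ⟨hub, hemp, hatt, hiff, hbest⟩ := hInv0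
  have hDne : D ≠ [] := List.ne_nil_of_mem ((PySem.Set.mem_ofList array a0).mpr ha0)
  unfold solution
  rw [pvDict_eq_counter]
  simp only [PySem.Dict.items_counter, PySem.Dict.values, PySem.Dict.items_counter, List.map_map]
  simp only [pvCnt, PySem.List.count_eq] at hub hatt hiff hbest
  rw [← hDdef]
  have hmx : PySem.List.max?
        (List.map ((fun (x : Int × Int) => x.2) ∘ fun k => (k, (List.count k array : Int))) D)
        (fun v => v)
      = some t.2.1 := by
    have hmapne : (List.map ((fun (x : Int × Int) => x.2) ∘ fun k => (k, (List.count k array : Int))) D) ≠ [] := by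
      simp [hDne]
    rcases hmax : PySem.List.max?
        (List.map ((fun (x : Int × Int) => x.2) ∘ fun k => (k, (List.count k array : Int))) D)
        (fun v => v) with _ | v
    · exact absurd ((PySem.List.max?_eq_none_iff _ _).mp hmax) hmapne
    · obtain ⟨x1, hx1, hx1v⟩ := List.mem_map.mp (PySem.List.max?_mem hmax)
      obtain ⟨x2, hx2, hx2v⟩ := hatt hDne
      have hle1 : v ≤ t.2.1 := by
        rw [← hx1v]
        exact hub x1 hx1
      have hle2 : t.2.1 ≤ v := by
        have := PySem.List.max?_isMax hmax ((List.count x2 array : Int))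
          (List.mem_map.mpr ⟨x2, hx2, rfl⟩)
        simpa [hx2v] using this
      exact congrArg some (le_antisymm hle1 hle2)
  simp only [hmx]
  have hcount : List.foldl (fun c ij => if (some ij.2 == some t.2.1) = true then c + 1 else c) 0
      (List.map (fun k => (k, (List.count k array : Int))) D)
      = ((List.countP (fun k => decide ((List.count k array : Int) = t.2.1)) D : Int)) := by
    rw [PySem.List.foldl_if_add_one, List.countP_map]
    norm_num
    apply List.countP_congr
    intro a ha
    by_cases h : ((List.count a array : Int) = t.2.1) <;> simp [h]
  have hfil : List.filter (fun kv => some kv.2 == some t.2.1)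
        (List.map (fun k => (k, (List.count k array : Int))) D)
      = List.map (fun k => (k, (List.count k array : Int)))
        (List.filter (fun k => decide ((List.count k array : Int) = t.2.1)) D) := by
    rw [List.filter_map]
    have hpred : ((fun (kv : Int × Int) => some kv.2 == some t.2.1) ∘ fun k => (k, ((List.count k array : Int))))
        = (fun k => decide ((List.count k array : Int) = t.2.1)) := by
      funext a
      by_cases h : ((List.count a array : Int) = t.2.1) <;> simp [h]
    rw [hpred]
  rw [hcount, hfil]
  by_cases hu : t.2.2 = true
  · obtain ⟨hc1, -⟩ := hiff.mp hu
    obtain ⟨hbmem, hbc⟩ := hbest hu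
    have hcInt : ((List.countP (fun k => decide ((List.count k array : Int) = t.2.1)) D : Nat) : Int) = 1 := by
      exact_mod_cast hc1
    rw [if_pos hcInt]
    have hF : List.filter (fun k => decide ((List.count k array : Int) = t.2.1)) D = [t.1] := by
      refine pvFilter_len_one t.1 _ ?_ ?_
      · exact List.mem_filter.mpr ⟨hbmem, by simp [hbc]⟩
      · rw [← List.countP_eq_length_filter]
        exact hc1
    rw [hF, hu]
    simp [PySem.List.pyGet?, PySem.List.pyIdx?]
  · have hcne : List.countP (fun k => decide ((List.count k array : Int) = t.2.1)) D ≠ 1 :=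
      fun h => hu (hiff.mpr ⟨h, hDne⟩)
    rw [if_neg (by exact_mod_cast hcne)]
    simp [hu]

-- ===== VERDICT (by name: the statement is the Claim_ definition above) =====
theorem solution_spec : Claim_equal_solution := by
  intro array _
  unfold Spec_solution
  rcases eq_or_ne array [] with rfl | hne
  · decide
  · rw [solution_alt_eq_scan, solution_eq_of_ne_nil array hne]
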